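-- pv_equiv track=rewrite | github.com/lkbbad/typeBeulerian | perms.py | make_dict_neg
-- ===== SOURCE A (Python) =====
-- def make_dict_neg(n, j,k,dictionary_neg):
--     dictionary_neg_des = {}
--     for des in range(0, n+1):
--         dictionary_neg_des[des] = []
--     for perm in dictionary_neg[j]:
--         des = 0
--         for j in range(0, len(perm)-1):
--             if (perm[j] > perm[j+1]):
--                 des += 1
--         dictionary_neg_des[des].append(perm)
--     return dictionary_neg_des
-- ===== SOURCE B (Python) =====
-- def make_dict_neg(n, j, k, dictionary_neg):
--     perms = dictionary_neg[j]
--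
--     def descents(p):
--         return sum(1 for a, b in zip(p, p[1:]) if a > b)
--
--     return {d: [p for p in perms if descents(p) == d] for d in range(n + 1)}
-- ===== Notes on version B (the rewrite author's own statement) =====
-- stated objective: idiomatic
-- what changed: Replaces A's single-pass bucket-append loop (seed dict, index loop counting descents, append into dictionary_neg_des[des]) by a per-key dict comprehension that filters the permutations by descent count computed with sum over zipped adjacent pairs.
import Mathlib
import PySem

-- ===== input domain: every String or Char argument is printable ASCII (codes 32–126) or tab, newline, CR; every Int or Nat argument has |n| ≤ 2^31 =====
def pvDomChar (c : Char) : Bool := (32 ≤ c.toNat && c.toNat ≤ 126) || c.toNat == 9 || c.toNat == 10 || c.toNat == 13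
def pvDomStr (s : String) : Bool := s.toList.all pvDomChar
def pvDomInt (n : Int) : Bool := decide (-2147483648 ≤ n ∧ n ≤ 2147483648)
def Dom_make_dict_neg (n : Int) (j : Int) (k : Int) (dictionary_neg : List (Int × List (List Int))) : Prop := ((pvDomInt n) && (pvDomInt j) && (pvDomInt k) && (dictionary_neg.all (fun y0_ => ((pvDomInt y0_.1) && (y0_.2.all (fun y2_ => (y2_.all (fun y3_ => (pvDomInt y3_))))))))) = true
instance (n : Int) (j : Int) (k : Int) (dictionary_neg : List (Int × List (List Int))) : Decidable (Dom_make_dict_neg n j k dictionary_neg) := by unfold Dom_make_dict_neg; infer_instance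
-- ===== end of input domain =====

-- B replaces A's single-pass bucket-append loop by an idiomatic per-key dict comprehension that
-- filters the permutations by descent count (counted over zipped adjacent pairs); return value only, no mutation.

-- ===== PORT A =====
-- inner descent-counting loop of A: 'des = 0; for j in range(0, len(perm)-1): if perm[j] > perm[j+1]: des += 1'
def desA (perm : List Int) : Int :=
  (PySem.List.pyRange 0 (PySem.List.len perm - 1) 1).foldl
    (fun des jj => if PySem.List.pyGetD perm jj 0 > PySem.List.pyGetD perm (jj + 1) 0 then des + 1 else des) 0

def make_dict_neg (n : Int) (j : Int) (k : Int) (dictionary_neg : List (Int × List (List Int))) : List (Int × List (List Int)) :=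
  -- dictionary_neg_des = {}; for des in range(0, n+1): dictionary_neg_des[des] = []
  let dinit : PySem.Dict Int (List (List Int)) :=
    (PySem.List.pyRange 0 (n + 1) 1).foldl (fun d des => d.insert des []) PySem.Dict.empty
  -- dictionary_neg[j]  (KeyError when j is absent: excluded by Pre_)
  let perms : List (List Int) := ((PySem.Dict.mk dictionary_neg).get? j).getD []
  -- for perm in ...: des = <inner loop>; dictionary_neg_des[des].append(perm)
  -- (dictionary_neg_des[des] is a KeyError when des ∉ keys: excluded by Pre_; 'modify' is the total guard)
  (perms.foldl (fun d perm => d.modify (desA perm) [] (fun l => l ++ [perm])) dinit).items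

-- ===== PORT B =====
-- descents(p) = sum(1 for a, b in zip(p, p[1:]) if a > b)
def pyDescents (p : List Int) : Int :=
  ((p.zip (PySem.List.slice p (some 1) none)).countP (fun ab => decide (ab.1 > ab.2)) : Int)

def make_dict_neg_alt (n : Int) (j : Int) (k : Int) (dictionary_neg : List (Int × List (List Int))) : List (Int × List (List Int)) :=
  let perms : List (List Int) := ((PySem.Dict.mk dictionary_neg).get? j).getD []
  -- {d: [p for p in perms if descents(p) == d] for d in range(n+1)}: the keys range(n+1) are
  -- distinct, so the comprehension's items are exactly this map in key order
  (PySem.List.pyRange 0 (n + 1) 1).map (fun d => (d, perms.filter (fun p => pyDescents p == d)))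

-- ===== PRECONDITION & SPEC =====
-- Pre_ excludes exactly the inputs where the Python A raises KeyError: a missing key j, or a
-- permutation in dictionary_neg[j] with more than n descents (its bucket key was never created).
def Pre_make_dict_neg (n : Int) (j : Int) (k : Int) (dictionary_neg : List (Int × List (List Int))) : Prop :=
  ((PySem.Dict.mk dictionary_neg).contains j = true) ∧
  ∀ p ∈ ((PySem.Dict.mk dictionary_neg).get? j).getD [], pyDescents p ≤ n
instance (n : Int) (j : Int) (k : Int) (dictionary_neg : List (Int × List (List Int))) : Decidable (Pre_make_dict_neg n j k dictionary_neg) := by unfold Pre_make_dict_neg; infer_instance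

def pvWitness_make_dict_neg : Int × Int × Int × (List (Int × List (List Int))) :=
  (1, 0, 0, [(0, [[1, 2], [2, 1]])])

def Spec_make_dict_neg (n : Int) (j : Int) (k : Int) (dictionary_neg : List (Int × List (List Int))) (out : List (Int × List (List Int))) : Prop := out = make_dict_neg_alt n j k dictionary_neg
instance (n : Int) (j : Int) (k : Int) (dictionary_neg : List (Int × List (List Int))) (out : List (Int × List (List Int))) : Decidable (Spec_make_dict_neg n j k dictionary_neg out) := by unfold Spec_make_dict_neg; infer_instance

-- ===== CLAIM (what is proved, stated in full; the proofs are below) =====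
def Claim_equal_make_dict_neg : Prop := ∀ (n : Int) (j : Int) (k : Int) (dictionary_neg : List (Int × List (List Int))), Dom_make_dict_neg n j k dictionary_neg → Pre_make_dict_neg n j k dictionary_neg → Spec_make_dict_neg n j k dictionary_neg (make_dict_neg n j k dictionary_neg)

-- ===== LEMMAS AND PROOFS =====

-- A's index loop counts exactly the descents B counts over zipped adjacent pairs.
theorem desA_eq (p : List Int) : desA p = pyDescents p := by
  unfold desA pyDescents
  rw [PySem.List.slice_from_one]
  cases p with
  | nil => rfl
  | cons x xs =>
    have hq : ((x :: xs).zip (x :: xs).tail).length = xs.length := by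
      simp [List.length_zip]
    have hlen : PySem.List.len (x :: xs) - 1 = (((x :: xs).zip (x :: xs).tail).length : Int) := by
      simp [PySem.List.len_eq, List.length_zip]
    rw [hlen]
    rw [PySem.List.foldl_congr_mem _ _
      (fun des jj => (fun (des : Int) (ab : Int × Int) =>
        if ab.1 > ab.2 then des + 1 else des) des
        (PySem.List.pyGetD ((x :: xs).zip (x :: xs).tail) jj (0, 0))) _ ?_]
    · rw [PySem.List.foldl_pyRange_zero_pyGetD' ((x :: xs).zip (x :: xs).tail) (0, 0)
        (fun (des : Int) (ab : Int × Int) => if ab.1 > ab.2 then des + 1 else des) 0]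
      rw [show (fun (des : Int) (ab : Int × Int) => if ab.1 > ab.2 then des + 1 else des)
            = (fun (acc : Int) (ab : Int × Int) => if (fun ab : Int × Int => decide (ab.1 > ab.2)) ab = true then acc + 1 else acc) by
            funext acc ab; simp]
      rw [PySem.List.foldl_count_if]
      simp
    · intro acc jj hjj
      have hb := (PySem.List.mem_pyRange_one.mp hjj)
      have h0 : 0 ≤ jj := hb.1
      have h1' : jj.toNat < xs.length := by
        have := hb.2; rw [hq] at this; omega
      have ht : (jj + 1).toNat = jj.toNat + 1 := by omega
      have hlt : jj.toNat < (x :: xs).length := by simp only [List.length_cons]; omega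
      have hlt1 : jj.toNat + 1 < (x :: xs).length := by simp only [List.length_cons]; omega
      have e1 : PySem.List.pyGetD (x :: xs) jj 0 = (x :: xs)[jj.toNat]'hlt :=
        PySem.List.pyGetD_eq_getElem _ _ h0 (by omega)
      have e2 : PySem.List.pyGetD (x :: xs) (jj + 1) 0 = (x :: xs)[jj.toNat + 1]'hlt1 := by
        rw [PySem.List.pyGetD_eq_getElem _ _ (by omega : (0:Int) ≤ jj + 1) (by omega)]
        simp only [ht]
      have e3 : PySem.List.pyGetD ((x :: xs).zip (x :: xs).tail) jj (0, 0)
          = ((x :: xs)[jj.toNat]'hlt, (x :: xs)[jj.toNat + 1]'hlt1) := by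
        rw [PySem.List.pyGetD_eq_getElem _ _ h0 (by rw [hq]; omega)]
        simp [List.getElem_zip]
      simp only [e1, e2, e3]

theorem pyDescents_nonneg (p : List Int) : 0 ≤ pyDescents p := by
  unfold pyDescents; positivity

theorem make_dict_neg_spec : Claim_equal_make_dict_neg := by
  intro n j k dn _hd hpre
  obtain ⟨-, hall⟩ := hpre
  unfold Spec_make_dict_neg make_dict_neg make_dict_neg_alt
  set perms : List (List Int) := ((PySem.Dict.mk dn).get? j).getD [] with hperms
  set keys0 : List Int := PySem.List.pyRange 0 (n + 1) 1 with hkeys0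
  set dinit : PySem.Dict Int (List (List Int)) :=
    keys0.foldl (fun d des => d.insert des []) PySem.Dict.empty with hdinit
  have hnodup0 : keys0.Nodup := PySem.List.nodup_pyRange_one 0 (n + 1)
  -- the initialisation loop: fresh distinct keys appended to the empty dict
  have hinit_items : dinit.items = keys0.map (fun d => (d, ([] : List (List Int)))) := by
    rw [hdinit, PySem.Dict.items_foldl_insert_fresh keys0 (fun x => x) (fun _ => []) PySem.Dict.empty
      (by intro a _; exact PySem.Dict.contains_empty a) (by simpa using hnodup0)]
    simp [PySem.Dict.empty]
  have hinit_keys : dinit.keys = keys0 := by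
    simp [PySem.Dict.keys, hinit_items, Function.comp_def]
  set final : PySem.Dict Int (List (List Int)) :=
    perms.foldl (fun d perm => d.modify (desA perm) [] (fun l => l ++ [perm])) dinit with hfinal
  have hmem0 : ∀ p ∈ perms, desA p ∈ keys0 := by
    intro p hp
    rw [hkeys0, PySem.List.mem_pyRange_one, desA_eq]
    exact ⟨pyDescents_nonneg p, by have := hall p hp; omega⟩
  -- the append loop touches only existing keys: the key list is unchanged
  have hfkeys : final.keys = keys0 := by
    rw [hfinal, PySem.Dict.keys_foldl_modify_key perms desA [] (fun _ perm l => l ++ [perm]) dinit,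
      hinit_keys, PySem.Set.update_eq_append_filter]
    have : (PySem.Set.ofList (perms.map desA)).filter (fun y => !(PySem.Set.contains keys0 y)) = [] := by
      rw [List.filter_eq_nil_iff]
      intro y hy
      have hy' : y ∈ perms.map desA := (PySem.Set.mem_ofList _ _).mp hy
      obtain ⟨p, hp, rfl⟩ := List.mem_map.mp hy'
      simpa using hmem0 p hp
    rw [this, List.append_nil]
  have hfnodup : final.keys.Nodup := hfkeys ▸ hnodup0
  rw [PySem.Dict.items_eq_map_keys final hfnodup [], hfkeys]
  apply List.map_congr_left
  intro d hd
  have hg : final.getD d [] = perms.filter (fun p => pyDescents p == d) := by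
    have hrw : final = (perms.map (fun p => (desA p, p))).foldl
        (fun d q => d.modify q.1 [] (fun l => l ++ [q.2])) dinit := by
      rw [hfinal, List.foldl_map]
    rw [hrw, PySem.Dict.getD_foldl_modify_append]
    have hd0 : dinit.getD d [] = [] := by
      refine PySem.Dict.getD_of_mem_items dinit ?_ (hinit_keys ▸ hnodup0) []
      rw [hinit_items]
      exact List.mem_map.mpr ⟨d, hd, rfl⟩
    rw [hd0, List.filter_map, List.map_map]
    simp only [Function.comp_def]
    rw [List.nil_append]
    have : (fun p : List Int => desA p == d) = (fun p : List Int => pyDescents p == d) := by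
      funext p; rw [desA_eq]
    rw [this]
    simp
  rw [hg]
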